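-- pv_equiv track=rewrite | github.com/ArtemioUrbina/240pTestSuite | 240psuite/NES/tools/savtool.py | decode_attribute_table
-- ===== SOURCE A (Python) =====
-- def decode_attribute_table(attrs):
--     """Decode a 64-byte NES attribute table to a 16x15 grid."""
--
--     from binascii import b2a_hex
--
--     # linearize attributes
--     attrs = [attrs[i:i + 8] for i in range(0, 64, 8)]
--     attrs = [([((c >> 0) & 0x03, (c >> 2) & 0x03) for c in row],
--               [((c >> 4) & 0x03, (c >> 6) & 0x03) for c in row])
--              for row in attrs]
--     attrs = [[subcol for byte in subrow for subcol in byte]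
--              for row in attrs for subrow in row]
--     return attrs[:15]
-- ===== SOURCE B (Python) =====
-- def decode_attribute_table(attrs):
--     """Decode a 64-byte NES attribute table to a 16x15 grid."""
--     out = []
--     for r in range(15):
--         base = (r // 2) * 8
--         n = min(8, len(attrs) - base)
--         row = []
--         for c in range(2 * n):
--             row.append((attrs[base + c // 2] >> (((r % 2) * 2 + (c % 2)) * 2)) & 3)
--         out.append(row)
--     return out
-- ===== Notes on version B (the rewrite author's own statement) =====
-- stated objective: alternative
-- what changed: Replaces A's three layered comprehensions (slice into 8-byte rows, decode each byte into two quadrant pairs, flatten pairs) with a direct per-cell computation: row r, column c reads byte (r//2)*8 + c//2 and extracts its 2-bit quadrant with a computed shift, iterating only over the bytes that exist.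
import Mathlib
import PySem

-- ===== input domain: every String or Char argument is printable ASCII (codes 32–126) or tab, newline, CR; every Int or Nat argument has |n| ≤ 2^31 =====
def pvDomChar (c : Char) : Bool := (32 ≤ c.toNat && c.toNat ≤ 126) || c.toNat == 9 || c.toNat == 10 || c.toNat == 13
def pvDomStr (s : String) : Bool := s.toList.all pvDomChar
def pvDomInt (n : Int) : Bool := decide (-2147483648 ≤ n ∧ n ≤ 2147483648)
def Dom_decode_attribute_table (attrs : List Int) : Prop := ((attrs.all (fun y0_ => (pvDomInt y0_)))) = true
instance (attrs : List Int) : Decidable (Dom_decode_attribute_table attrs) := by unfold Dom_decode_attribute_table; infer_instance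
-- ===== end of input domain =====

-- B builds each of the 15 rows by direct positional indexing (byte (r//2)*8 + c//2, 2-bit
-- quadrant picked by a computed shift) instead of A's three layered comprehensions: a
-- different decomposition of the same decoding, not faster.

-- ===== PORT A =====
def decode_attribute_table (attrs : List Int) : List (List Int) :=
  -- attrs = [attrs[i:i+8] for i in range(0, 64, 8)]
  let rows := (PySem.List.pyRange 0 64 8).map (fun i => PySem.List.slice attrs (some i) (some (i + 8)))
  -- pair decode: ((c>>0)&3, (c>>2)&3) and ((c>>4)&3, (c>>6)&3); x >> k is floordiv x 2^k, x & 3 is mod x 4 (exact for all ints)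
  let pairs := rows.map (fun row =>
      (row.map (fun c => (PySem.Int.mod (PySem.Int.floordiv c 1) 4,
                          PySem.Int.mod (PySem.Int.floordiv c 4) 4)),
       row.map (fun c => (PySem.Int.mod (PySem.Int.floordiv c 16) 4,
                          PySem.Int.mod (PySem.Int.floordiv c 64) 4))))
  -- [[subcol for byte in subrow for subcol in byte] for row in pairs for subrow in row]
  let flat := pairs.flatMap (fun row =>
      [row.1, row.2].map (fun subrow => subrow.flatMap (fun byte => [byte.1, byte.2])))
  -- return flat[:15]
  PySem.List.slice flat none (some 15)

-- ===== PORT B =====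
def decode_attribute_table_alt (attrs : List Int) : List (List Int) :=
  (List.range 15).foldl (fun out r =>
    let base : Int := ((r / 2 : Nat) : Int) * 8
    let n : Int := min 8 ((attrs.length : Int) - base)
    -- row = [(attrs[base + c//2] >> (((r%2)*2 + c%2)*2)) & 3 for c in range(2*n)]
    let row : List Int := (PySem.List.pyRange 0 (2 * n) 1).foldl (fun row c =>
        row ++ [PySem.Int.mod
          (PySem.Int.floordiv (PySem.List.pyGetD attrs (base + PySem.Int.floordiv c 2) 0)
            ((2 : Int) ^ ((((r % 2) * 2 + (PySem.Int.mod c 2).toNat) * 2))))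
          4]) []
    out ++ [row]) []

-- ===== PRECONDITION & SPEC =====
def Spec_decode_attribute_table (attrs : List Int) (out : List (List Int)) : Prop := out = decode_attribute_table_alt attrs
instance (attrs : List Int) (out : List (List Int)) : Decidable (Spec_decode_attribute_table attrs out) := by unfold Spec_decode_attribute_table; infer_instance

-- ===== CLAIM (what is proved, stated in full; the proofs are below) =====
def Claim_equal_decode_attribute_table : Prop := ∀ (attrs : List Int), Dom_decode_attribute_table attrs → Spec_decode_attribute_table attrs (decode_attribute_table attrs)

-- ===== LEMMAS AND PROOFS =====

-- quadrant value (b >> k) & 3, the common currency of both ports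
def pvQ (b : Int) (k : Nat) : Int := PySem.Int.mod (PySem.Int.floordiv b ((2 : Int) ^ k)) 4

-- pair-expansion: reading an indexed source twice per element (index c/2, parity c%2)
-- is the same list as flatMapping two-element blocks over the source
theorem pv_expand {α β : Type} (F : α → Nat → β) (s : List α) (g : Nat → α) (d : α)
    (hg : ∀ k, k < s.length → g k = s.getD k d) :
    (List.range (2 * s.length)).map (fun c => F (g (c / 2)) (c % 2))
      = s.flatMap (fun b => [F b 0, F b 1]) := by
  induction s generalizing g with
  | nil => simp
  | cons x s ih =>
    have h2 : 2 * (x :: s).length = 2 + 2 * s.length := by simp [List.length_cons]; ring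
    rw [h2, List.range_add, List.map_append, List.map_map]
    have hx : g 0 = x := by simpa using hg 0 (by simp)
    have htail : (List.range (2 * s.length)).map
          ((fun c => F (g (c / 2)) (c % 2)) ∘ (fun k => 2 + k))
        = s.flatMap (fun b => [F b 0, F b 1]) := by
      have := ih (fun k => g (1 + k)) (fun k hk => by
        have := hg (1 + k) (by simp [List.length_cons]; omega)
        simpa [Nat.add_comm] using this)
      rw [← this]
      apply List.map_congr_left
      intro c _
      have hdiv : (2 + c) / 2 = 1 + c / 2 := by omega
      have hmod : (2 + c) % 2 = c % 2 := by omega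
      simp [Function.comp, hdiv, hmod]
    rw [htail]
    simp [List.range_succ, List.flatMap_cons, hx]

-- per-row: B's direct positional indexing equals a flatMap over the byte-row slice
theorem pv_row (attrs : List Int) (F : Int → Nat → Int) (base : Nat) :
    (List.range (2 * (min 8 (attrs.length - base)))).map
        (fun c => F (attrs.getD (base + c / 2) 0) (c % 2))
      = ((attrs.drop base).take 8).flatMap (fun b => [F b 0, F b 1]) := by
  have hlen : ((attrs.drop base).take 8).length = min 8 (attrs.length - base) := by
    simp [List.length_take, List.length_drop]
  rw [← hlen]
  exact pv_expand F _ (fun k => attrs.getD (base + k) 0) 0 (fun k hk => by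
    rw [hlen] at hk
    simp [List.getD, List.getElem?_drop, (show k < 8 by omega)])

-- B in canonical form: 15 rows, row r = byte-row r/2 decoded at parity r%2
theorem pv_B_eq (attrs : List Int) : decode_attribute_table_alt attrs
    = (List.range 15).map (fun r =>
        ((attrs.drop ((r / 2) * 8)).take 8).flatMap
          (fun b => [pvQ b (((r % 2) * 2 + 0) * 2), pvQ b (((r % 2) * 2 + 1) * 2)])) := by
  unfold decode_attribute_table_alt
  rw [PySem.List.foldl_append_singleton_eq_map]
  simp only [List.nil_append]
  apply List.map_congr_left
  intro r _
  rw [PySem.List.foldl_append_singleton_eq_map]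
  simp only [List.nil_append]
  rw [PySem.List.pyRange_one]
  rw [List.map_map]
  have hT : (2 * min 8 ((attrs.length : Int) - ((r / 2 : Nat) : Int) * 8) - 0).toNat
      = 2 * min 8 (attrs.length - (r / 2) * 8) := by
    push_cast
    omega
  rw [hT]
  rw [← pv_row attrs (fun b j => pvQ b (((r % 2) * 2 + j) * 2)) ((r / 2) * 8)]
  apply List.map_congr_left
  intro k _
  have h1 : PySem.Int.floordiv ((0 : Int) + (k : Int)) 2 = ((k / 2 : Nat) : Int) := by
    rw [zero_add]; exact_mod_cast PySem.Int.floordiv_natCast k 2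
  have h2 : PySem.Int.mod ((0 : Int) + (k : Int)) 2 = ((k % 2 : Nat) : Int) := by
    rw [zero_add]; exact_mod_cast PySem.Int.mod_natCast k 2
  simp only [Function.comp, h1, h2]
  have h3 : ((r / 2 : Nat) : Int) * 8 + ((k / 2 : Nat) : Int) = (((r / 2) * 8 + k / 2 : Nat) : Int) := by
    push_cast; ring
  rw [h3, PySem.List.pyGetD_natCast]
  have h4 : (((k : Int)) % 2).toNat = k % 2 := by omega
  simp [pvQ, h4]

-- A in the same canonical form (its 8 byte-row slices and the final [:15] are concrete)
theorem pv_A_eq (attrs : List Int) : decode_attribute_table attrs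
    = (List.range 15).map (fun r =>
        ((attrs.drop ((r / 2) * 8)).take 8).flatMap
          (fun b => [pvQ b (((r % 2) * 2 + 0) * 2), pvQ b (((r % 2) * 2 + 1) * 2)])) := by
  unfold decode_attribute_table
  rw [show PySem.List.pyRange 0 64 8 = [0, 8, 16, 24, 32, 40, 48, 56] from by decide]
  rw [show (List.range 15) = [0,1,2,3,4,5,6,7,8,9,10,11,12,13,14] from by decide]
  rw [PySem.List.slice_to _ (by norm_num)]
  norm_num [PySem.List.slice_toNat, List.flatMap_map, pvQ]
  simp [← List.map_drop, ← List.map_take, List.flatMap_map]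

-- ===== VERDICT (by name: the statement is the Claim_ definition above) =====
theorem decode_attribute_table_spec : Claim_equal_decode_attribute_table := by
  intro attrs _
  unfold Spec_decode_attribute_table
  rw [pv_A_eq, pv_B_eq]
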